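-- pv_equiv track=rewrite | github.com/wzlzju/drawsim | util.py | translatePresetting
-- ===== SOURCE A (Python) =====
-- def translatePresetting(s, charas):
--     exp = ""
--     while True:
--         i = s.find('[')
--         if i == -1:
--             exp += s
--             break
--         exp += s[:i]
--         s = s[i+1:]
--         j = s.find(']')
--         if j == -1:
--             j = len(s)
--         tmp = s[:j]
--         s = s[j+1:]
--         identifier = tmp.strip().split()[0].lower()
--         color = tmp.strip().split()[1].lower()
--         num = int(tmp.strip().split()[2])
--         ttmp = {'all':' and ','any':' or '}[identifier].join(["%s %d"%(c['name'],num) for c in charas if c['color']==color])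
--         if ttmp == "":
--             ttmp = "True"
--         exp += "(%s)"%ttmp
--     return exp
-- ===== SOURCE B (Python) =====
-- import re
--
-- def translatePresetting(s, charas):
--     def repl(m):
--         words = m.group(1).strip().split()
--         identifier = words[0].lower()
--         color = words[1].lower()
--         num = int(words[2])
--         ttmp = {'all': ' and ', 'any': ' or '}[identifier].join(
--             "%s %d" % (c['name'], num) for c in charas if c['color'] == color)
--         return "(%s)" % (ttmp if ttmp else "True")
--     return re.sub(r'\[([^\]]*)\]?', repl, s)
-- ===== Notes on version B (the rewrite author's own statement) =====
-- stated objective: idiomatic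
-- what changed: Replaces A's explicit while-loop with repeated s.find('[')/s.find(']') and slice reassignment of s by a single re.sub pass with a callback: the regex \[([^\]]*)\]? matches each bracketed token (an unclosed '[' consumes the rest) and the callback builds the parenthesised boolean clause; non-bracket text is left in place by the regex engine.
import Mathlib
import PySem

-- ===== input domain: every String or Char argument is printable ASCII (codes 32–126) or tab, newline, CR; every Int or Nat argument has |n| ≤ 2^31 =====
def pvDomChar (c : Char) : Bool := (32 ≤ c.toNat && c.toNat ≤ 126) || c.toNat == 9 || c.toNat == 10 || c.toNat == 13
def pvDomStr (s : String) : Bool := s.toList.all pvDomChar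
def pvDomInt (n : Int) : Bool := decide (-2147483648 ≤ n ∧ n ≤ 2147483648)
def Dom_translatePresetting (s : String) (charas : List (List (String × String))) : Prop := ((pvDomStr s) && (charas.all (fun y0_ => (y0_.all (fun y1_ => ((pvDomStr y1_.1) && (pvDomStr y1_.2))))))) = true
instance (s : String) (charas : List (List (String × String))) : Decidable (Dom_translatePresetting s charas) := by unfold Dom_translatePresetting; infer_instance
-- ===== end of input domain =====

-- B replaces A's while/find/slice loop by a single regex-substitution pass
-- (re.sub with a callback); the bracket-token processing itself is unchanged.
-- Equal return values on Pre_ (the inputs where A raises no exception).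

-- ===== PORT A =====
-- the body of A's while loop, iterated by well-founded recursion on s.length
-- (each iteration drops at least the found '[')
def pvALoop (charas : List (List (String × String))) (exp s : List Char) : List Char :=
  let i := PySem.Chars.find s ['[']
  if hi : i = -1 then exp ++ s
  else
    let exp1 := exp ++ PySem.Chars.slice s none (some i)
    let s1 := PySem.Chars.slice s (some (i + 1)) none
    let j0 := PySem.Chars.find s1 [']']
    let j := if j0 = -1 then (s1.length : Int) else j0
    let tmp := PySem.Chars.slice s1 none (some j)
    let s2 := PySem.Chars.slice s1 (some (j + 1)) none
    -- identifier / color / num: tmp.strip().split() recomputed three times, as in A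
    let identifier := PySem.Chars.lower (((PySem.Chars.split₀ (PySem.Chars.strip tmp)).getD 0 []))   -- [0]: IndexError → outside Pre_
    let color := PySem.Chars.lower (((PySem.Chars.split₀ (PySem.Chars.strip tmp)).getD 1 []))
    let num := (PySem.Int.ofChars? ((PySem.Chars.split₀ (PySem.Chars.strip tmp)).getD 2 [])).getD 0  -- ValueError → outside Pre_
    -- {'all':' and ','any':' or '}[identifier]: KeyError → outside Pre_
    let sep := if identifier = "all".toList then " and ".toList
               else if identifier = "any".toList then " or ".toList else []
    -- list comprehension: c['color']/c['name'] lookups (KeyError → outside Pre_)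
    let ttmp := PySem.Chars.join sep
      ((charas.filter (fun c => ((c.lookup "color").getD "").toList = color)).map
        (fun c => ((c.lookup "name").getD "").toList ++ ' ' :: PySem.Int.toChars num))
    let ttmp := if ttmp = [] then "True".toList else ttmp
    pvALoop charas (exp1 ++ '(' :: ttmp ++ [')']) s2
termination_by s.length
decreasing_by
  have h0 : (0:Int) ≤ PySem.Chars.find s ['['] := by
    have := PySem.Chars.neg_one_le_find s ['[']
    omega
  have hne : s ≠ [] := by
    intro h; subst h
    have : ¬ (['['] <:+: ([] : List Char)) := by
      intro hin; have := List.IsInfix.length_le hin; simp at this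
    have := (PySem.Chars.find_nonneg_iff [] ['[']).mp h0
    exact absurd this ‹_›
  have hlen : 1 ≤ s.length := by cases s with | nil => exact absurd rfl hne | cons a l => simp
  simp only [PySem.Chars.slice_eq_listSlice, PySem.List.slice_some_none]
  have c1 : 1 ≤ PySem.List.clampIdx s.length (PySem.Chars.find s ['['] + 1) := by
    rw [show PySem.Chars.find s ['['] + 1 = (((PySem.Chars.find s ['[']).toNat + 1 : Nat) : Int) by omega,
      PySem.List.clampIdx_natCast]
    omega
  simp only [List.length_drop]
  omega

def translatePresetting (s : String) (charas : List (List (String × String))) : String :=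
  String.ofList (pvALoop charas [] s.toList)

-- ===== PORT B =====
-- re.sub(r'\[([^\]]*)\]?', repl, s): the regex engine's left-to-right scan —
-- copy text up to the next '[', take the token = run of non-']' chars after it,
-- consume the optional ']', substitute repl(token), continue on the rest.
def pvRepl (charas : List (List (String × String))) (tok : List Char) : List Char :=
  let words := PySem.Chars.split₀ (PySem.Chars.strip tok)
  let identifier := PySem.Chars.lower (words.getD 0 [])
  let color := PySem.Chars.lower (words.getD 1 [])
  let num := (PySem.Int.ofChars? (words.getD 2 [])).getD 0
  let sep := if identifier = "all".toList then " and ".toList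
             else if identifier = "any".toList then " or ".toList else []
  let ttmp := PySem.Chars.join sep
    ((charas.filter (fun c => ((c.lookup "color").getD "").toList = color)).map
      (fun c => ((c.lookup "name").getD "").toList ++ ' ' :: PySem.Int.toChars num))
  '(' :: (if ttmp = [] then "True".toList else ttmp) ++ [')']

def pvBScan (charas : List (List (String × String))) (cs : List Char) : List Char :=
  let pre := cs.takeWhile (fun x => x ≠ '[')
  match h : cs.dropWhile (fun x => x ≠ '[') with
  | [] => pre
  | _ :: r =>
    pre ++ pvRepl charas (r.takeWhile (fun x => x ≠ ']'))
        ++ pvBScan charas ((r.dropWhile (fun x => x ≠ ']')).tail)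
termination_by cs.length
decreasing_by
  have h1 : (cs.dropWhile (fun x => x ≠ '[')).length ≤ cs.length := cs.length_dropWhile_le _
  rw [h] at h1
  have h2 : (r.dropWhile (fun x => x ≠ ']')).length ≤ r.length := r.length_dropWhile_le _
  have h3 : ((r.dropWhile (fun x => x ≠ ']')).tail).length = (r.dropWhile (fun x => x ≠ ']')).length - 1 :=
    List.length_tail
  simp at h1
  omega

def translatePresetting_alt (s : String) (charas : List (List (String × String))) : String :=
  String.ofList (pvBScan charas s.toList)

-- ===== PRECONDITION & SPEC =====
-- the bracketed tokens of s, by a single structural scan (outside a bracket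
-- until '[', inside until ']'; an unclosed bracket yields the rest as a token)
def pvTokAux : List Char → Option (List Char) → List (List Char)
  | [], none => []
  | [], some acc => [acc.reverse]
  | c :: rest, none => if c = '[' then pvTokAux rest (some []) else pvTokAux rest none
  | c :: rest, some acc => if c = ']' then acc.reverse :: pvTokAux rest none else pvTokAux rest (some (c :: acc))

-- a token A processes without an exception: ≥ 3 whitespace-separated words,
-- first word 'all'/'any' (case-insensitive), third an int literal, every chara
-- has a 'color' key, and a 'name' key whenever its color matches the token's
def pvTokOK (charas : List (List (String × String))) (t : List Char) : Prop :=
  let ws := PySem.Chars.split₀ (PySem.Chars.strip t)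
  3 ≤ ws.length ∧
  (PySem.Chars.lower (ws.getD 0 []) = "all".toList ∨ PySem.Chars.lower (ws.getD 0 []) = "any".toList) ∧
  (PySem.Int.ofChars? (ws.getD 2 [])).isSome ∧
  ∀ c ∈ charas, (c.lookup "color").isSome ∧
    (((c.lookup "color").getD "").toList = PySem.Chars.lower (ws.getD 1 []) → (c.lookup "name").isSome)

-- Pre_ = exactly the inputs on which A returns (A raises IndexError/KeyError/ValueError otherwise)
def Pre_translatePresetting (s : String) (charas : List (List (String × String))) : Prop :=
  ∀ t ∈ pvTokAux s.toList none, pvTokOK charas t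
instance (s : String) (charas : List (List (String × String))) : Decidable (Pre_translatePresetting s charas) := by
  unfold Pre_translatePresetting pvTokOK; infer_instance

def pvWitness_translatePresetting : String × (List (List (String × String))) :=
  ("go [all red 2] or [any blue 3]!", [[("name", "A"), ("color", "red")], [("name", "B"), ("color", "blue")]])

def Spec_translatePresetting (s : String) (charas : List (List (String × String))) (out : String) : Prop := out = translatePresetting_alt s charas
instance (s : String) (charas : List (List (String × String))) (out : String) : Decidable (Spec_translatePresetting s charas out) := by unfold Spec_translatePresetting; infer_instance

-- ===== CLAIM (what is proved, stated in full; the proofs are below) =====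
def Claim_equal_translatePresetting : Prop := ∀ (s : String) (charas : List (List (String × String))), Dom_translatePresetting s charas → Pre_translatePresetting s charas → Spec_translatePresetting s charas (translatePresetting s charas)

-- ===== LEMMAS AND PROOFS =====

lemma pvSingleton_prefix {c : Char} {l : List Char} : [c] <+: l ↔ ∃ t, l = c :: t := by
  constructor
  · rintro ⟨t, rfl⟩; exact ⟨t, rfl⟩
  · rintro ⟨t, rfl⟩; exact ⟨t, rfl⟩

lemma pvSingleton_infix {c : Char} {l : List Char} : [c] <:+: l ↔ c ∈ l := by
  constructor
  · rintro ⟨s, t, rfl⟩; simp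
  · intro h; obtain ⟨u, v, rfl⟩ := List.append_of_mem h; exact ⟨u, v, by simp⟩

-- the first index where c occurs is the length of takeWhile (≠ c)
lemma pvFirstIdx (c : Char) : ∀ (cs : List Char) (n : Nat),
    [c] <+: cs.drop n → (∀ i < n, ¬ [c] <+: cs.drop i) →
    n = (cs.takeWhile (fun x => x ≠ c)).length := by
  intro cs
  induction cs with
  | nil =>
    intro n h _
    rw [List.drop_nil] at h
    obtain ⟨t, ht⟩ := pvSingleton_prefix.mp h
    cases ht
  | cons a as ih =>
    intro n h hmin
    by_cases hac : a = c
    · subst hac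
      rcases Nat.eq_zero_or_pos n with rfl | hpos
      · simp
      · exact absurd (pvSingleton_prefix.mpr ⟨as, by simp⟩) (hmin 0 hpos)
    · have hn0 : n ≠ 0 := by
        rintro rfl
        have h' : c = a := by simpa using h
        exact hac h'.symm
      obtain ⟨m, rfl⟩ := Nat.exists_eq_succ_of_ne_zero hn0
      have h' : [c] <+: as.drop m := by simpa using h
      have hmin' : ∀ i < m, ¬ [c] <+: as.drop i := by
        intro i hi hpre
        exact hmin (i + 1) (by omega) (by simpa using hpre)
      rw [List.takeWhile_cons, if_pos (by simp [hac]), List.length_cons, ← ih m h' hmin']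

lemma pvFind_char (c : Char) (cs : List Char) (h : c ∈ cs) :
    PySem.Chars.find cs [c] = ((cs.takeWhile (fun x => x ≠ c)).length : Int) := by
  have h0 : (0:Int) ≤ PySem.Chars.find cs [c] :=
    (PySem.Chars.find_nonneg_iff cs [c]).mpr (pvSingleton_infix.mpr h)
  obtain ⟨hpre, hmin⟩ := PySem.Chars.find_spec h0
  have := pvFirstIdx c cs (PySem.Chars.find cs [c]).toNat hpre hmin
  omega

lemma pvDropWhile_head {c x : Char} {cs r : List Char}
    (h : cs.dropWhile (fun x => x ≠ c) = x :: r) : x = c := by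
  induction cs with
  | nil => cases h
  | cons a as ih =>
    rw [List.dropWhile_cons] at h
    by_cases hac : a = c
    · rw [if_neg (by simp [hac])] at h
      injection h with h1 _
      rw [← h1, hac]
    · rw [if_pos (by simp [hac])] at h
      exact ih h

lemma pvNotMem_of_dropWhile_nil {c : Char} {cs : List Char}
    (h : cs.dropWhile (fun x => x ≠ c) = []) : c ∉ cs := by
  intro hmem
  have heq := List.takeWhile_append_dropWhile (p := fun x => decide (x ≠ c)) (l := cs)
  rw [h, List.append_nil] at heq
  rw [← heq] at hmem
  have := List.mem_takeWhile_imp hmem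
  simp at this

lemma pvMem_of_dropWhile_cons {c x : Char} {cs r : List Char}
    (h : cs.dropWhile (fun x => x ≠ c) = x :: r) : c ∈ cs := by
  have hx : x = c := pvDropWhile_head h
  have hmem : x ∈ cs.dropWhile (fun x => x ≠ c) := by rw [h]; simp
  exact hx ▸ ((List.dropWhile_sublist _).subset hmem)

lemma pvBScan_eq_nil {charas : List (List (String × String))} {cs : List Char}
    (h : cs.dropWhile (fun x => x ≠ '[') = []) :
    pvBScan charas cs = cs.takeWhile (fun x => x ≠ '[') := by
  rw [pvBScan.eq_def]
  split
  · rfl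
  · next y r2 heq => rw [h] at heq; cases heq

lemma pvBScan_eq_cons {charas : List (List (String × String))} {cs r : List Char} {x : Char}
    (h : cs.dropWhile (fun x => x ≠ '[') = x :: r) :
    pvBScan charas cs = cs.takeWhile (fun x => x ≠ '[')
      ++ pvRepl charas (r.takeWhile (fun x => x ≠ ']'))
      ++ pvBScan charas ((r.dropWhile (fun x => x ≠ ']')).tail) := by
  rw [pvBScan.eq_def]
  split
  · next heq => rw [h] at heq; cases heq
  · next y r2 heq =>
      rw [h] at heq
      injection heq with h1 h2
      subst h2
      rfl

-- one A-iteration equals one B-step, by functional induction over B's scan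
lemma pvMain (charas : List (List (String × String))) : ∀ (cs exp : List Char),
    pvALoop charas exp cs = exp ++ pvBScan charas cs := by
  intro cs
  induction cs using pvBScan.induct with
  | case1 cs h =>
    intro exp
    have hnot : '[' ∉ cs := pvNotMem_of_dropWhile_nil h
    have hfind : PySem.Chars.find cs ['['] = -1 :=
      (PySem.Chars.find_eq_neg_one_iff _ _).mpr (fun hin => hnot (pvSingleton_infix.mp hin))
    have htw : cs.takeWhile (fun x => x ≠ '[') = cs := by
      have heq := List.takeWhile_append_dropWhile (p := fun x => decide (x ≠ '[')) (l := cs)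
      rw [h, List.append_nil] at heq
      exact heq
    rw [pvALoop, pvBScan_eq_nil h]
    simp only [hfind]
    rw [dif_pos trivial, htw]
  | case2 cs x r h ih =>
    intro exp
    have hx : x = '[' := pvDropWhile_head h
    subst hx
    have hmem : '[' ∈ cs := pvMem_of_dropWhile_cons h
    have hfind : PySem.Chars.find cs ['['] =
        (((cs.takeWhile (fun x => x ≠ '[')).length : Nat) : Int) := pvFind_char _ _ hmem
    set pre := cs.takeWhile (fun x => x ≠ '[') with hpre'
    have hcs : cs = pre ++ '[' :: r := by
      have heq := List.takeWhile_append_dropWhile (p := fun x => decide (x ≠ '[')) (l := cs)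
      rw [← hpre', h] at heq
      exact heq.symm
    have htake : PySem.List.slice cs none (some ((pre.length : Nat) : Int)) = pre := by
      rw [PySem.List.slice_to_natCast, hcs]
      exact List.take_left
    have hdrop : PySem.List.slice cs (some (((pre.length : Nat) : Int) + 1)) none = r := by
      rw [show ((pre.length : Int) + 1) = ((pre.length + 1 : Nat) : Int) by push_cast; ring,
        PySem.List.slice_from_natCast, hcs,
        show pre ++ '[' :: r = (pre ++ ['[']) ++ r from by simp,
        show pre.length + 1 = (pre ++ ['[']).length from by simp]
      exact List.drop_left
    rw [pvALoop, pvBScan_eq_cons h, ← hpre']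
    simp only [PySem.Chars.slice_eq_listSlice, hfind, htake, hdrop]
    rw [dif_neg (by omega)]
    set t := r.takeWhile (fun x => x ≠ ']') with ht
    set u := (r.dropWhile (fun x => x ≠ ']')).tail with hu
    by_cases hr : ']' ∈ r
    · -- the token is closed by a ']'
      have hdw : r.dropWhile (fun x => x ≠ ']') = ']' :: u := by
        rw [hu]
        rcases heq : r.dropWhile (fun x => x ≠ ']') with _ | ⟨y, r2⟩
        · exact absurd hr (pvNotMem_of_dropWhile_nil heq)
        · have hy : y = ']' := pvDropWhile_head heq
          rw [hy]
          rfl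
      have hr2 : r = t ++ ']' :: u := by
        have heq := List.takeWhile_append_dropWhile (p := fun x => decide (x ≠ ']')) (l := r)
        rw [← ht, hdw] at heq
        exact heq.symm
      have hfind2 : PySem.Chars.find r [']'] = ((t.length : Nat) : Int) := by
        rw [ht]
        exact pvFind_char _ _ hr
      have htake2 : PySem.List.slice r none (some ((t.length : Nat) : Int)) = t := by
        rw [PySem.List.slice_to_natCast, hr2]
        exact List.take_left
      have hdrop2 : PySem.List.slice r (some (((t.length : Nat) : Int) + 1)) none = u := by
        rw [show ((t.length : Int) + 1) = ((t.length + 1 : Nat) : Int) by push_cast; ring,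
          PySem.List.slice_from_natCast, hr2,
          show t ++ ']' :: u = (t ++ [']']) ++ u from by simp,
          show t.length + 1 = (t ++ [']']).length from by simp]
        exact List.drop_left
      simp only [hfind2]
      rw [if_neg (show ¬((t.length : Nat) : Int) = -1 by omega)]
      simp only [htake2, hdrop2]
      rw [ih]
      simp [pvRepl]
    · -- no closing ']': the rest of the string is the token
      have hdw : r.dropWhile (fun x => x ≠ ']') = [] := by
        rw [List.dropWhile_eq_nil_iff]
        intro y hy
        simp only [decide_eq_true_eq]
        exact fun hyc => hr (hyc ▸ hy)
      have htw2 : t = r := by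
        have heq := List.takeWhile_append_dropWhile (p := fun x => decide (x ≠ ']')) (l := r)
        rw [← ht, hdw, List.append_nil] at heq
        exact heq
      have hu2 : u = [] := by rw [hu, hdw]; rfl
      have hfind2 : PySem.Chars.find r [']'] = -1 :=
        (PySem.Chars.find_eq_neg_one_iff _ _).mpr (fun hin => hr (pvSingleton_infix.mp hin))
      have htake2 : PySem.List.slice r none (some ((r.length : Nat) : Int)) = t := by
        rw [PySem.List.slice_to_natCast, List.take_length]
        exact htw2.symm
      have hdrop2 : PySem.List.slice r (some (((r.length : Nat) : Int) + 1)) none = u := by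
        rw [show ((r.length : Int) + 1) = ((r.length + 1 : Nat) : Int) by push_cast; ring,
          PySem.List.slice_from_natCast, List.drop_of_length_le (by omega), hu2]
      simp only [hfind2]
      rw [if_pos trivial]
      simp only [htake2, hdrop2]
      rw [ih]
      simp [pvRepl]

-- ===== VERDICT (by name: the statement is the Claim_ definition above) =====
theorem translatePresetting_spec : Claim_equal_translatePresetting := by
  intro s charas _ _
  unfold Spec_translatePresetting translatePresetting translatePresetting_alt
  rw [pvMain charas s.toList []]
  rfl
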